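-- pv_equiv track=rewrite | github.com/Grunger/EGE | test (2).py | f
-- ===== SOURCE A (Python) =====
-- def f(st, fn, way):
--     if way.count('3') > 1:
--         return 0
--     if st > fn:
--         return 0
--     if st == fn:
--         if '3' in way:
--             return 1
--         else:
--             return 0
--     return f(st + 1, fn, way + '1') + \
--            f(st + 2, fn, way + '2') + \
--            f(st * 2, fn, way + '3')
-- ===== SOURCE B (Python) =====
-- def climb(d):
--     # number of ways to climb a gap of d using steps of size 1 and 2
--     a, b = 1, 0
--     for _ in range(d):
--         a, b = a + b, a
--     return a
--
-- def f(st, fn, way):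
--     c = way.count('3')
--     if c > 1 or st > fn:
--         return 0
--     if c == 1:
--         # one doubling already used: only +1/+2 moves remain
--         return climb(fn - st)
--     # no doubling used yet: a valid path climbs st -> m, doubles m -> 2*m (needs m < fn, 2*m <= fn),
--     # then climbs 2*m -> fn
--     top = min(fn, fn // 2 + 1)
--     return sum(climb(m - st) * climb(fn - 2 * m) for m in range(st, top))
-- ===== Notes on version B (the rewrite author's own statement) =====
-- stated objective: alternative
-- what changed: Replaces A's 3-way recursion over (st,fn,way) by a combinatorial closed form: an iterative staircase count ('climb', ways to cover a gap with steps 1 and 2) plus, when no doubling has been used yet, one sum over the position m where the single doubling happens; it trades A's tree recursion for two loops.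
import Mathlib
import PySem

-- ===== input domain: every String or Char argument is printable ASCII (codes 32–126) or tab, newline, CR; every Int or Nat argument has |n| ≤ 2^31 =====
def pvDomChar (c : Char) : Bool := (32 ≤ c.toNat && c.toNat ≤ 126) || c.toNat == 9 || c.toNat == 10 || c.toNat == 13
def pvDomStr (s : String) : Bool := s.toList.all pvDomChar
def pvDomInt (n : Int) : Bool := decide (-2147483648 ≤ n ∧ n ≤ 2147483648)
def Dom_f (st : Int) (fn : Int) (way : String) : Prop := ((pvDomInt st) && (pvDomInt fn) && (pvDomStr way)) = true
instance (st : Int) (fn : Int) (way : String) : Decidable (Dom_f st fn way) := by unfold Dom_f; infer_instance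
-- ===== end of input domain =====

-- B replaces A's 3-way tree recursion by a closed combinatorial form: an iterative staircase
-- count ('climb') plus one sum over the position of the single doubling (objective: alternative).

-- The next five lemmas are cited by `f`'s decreasing_by (how way.count('3') evolves along A's recursion).
theorem count_go_one (c : Char) : ∀ (fuel : Nat) (s : List Char) (acc : Nat),
    s.length ≤ fuel → PySem.Chars.count.go [c] fuel s acc = acc + s.count c := by
  intro fuel
  induction fuel with
  | zero =>
    intro s acc h
    have : s = [] := List.length_eq_zero_iff.mp (Nat.le_zero.mp h)
    subst this
    simp [PySem.Chars.count.go]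
  | succ n ih =>
    intro s acc h
    cases s with
    | nil => simp [PySem.Chars.count.go]
    | cons x t =>
      rw [PySem.Chars.count.go]
      by_cases hx : c = x
      · subst hx
        simp [List.isPrefixOf, ih t _ (by simpa using h)]
        omega
      · simp [List.isPrefixOf, hx, ih t _ (by simpa using h), Ne.symm hx]

theorem chars_count_one (s : List Char) (c : Char) :
    PySem.Chars.count s [c] = s.count c := by
  rw [PySem.Chars.count, if_neg (by simp)]
  simpa using count_go_one c s.length s 0 le_rfl

theorem count3_app1 (w : String) : PySem.Str.count (w ++ "1") "3" = PySem.Str.count w "3" := by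
  rw [PySem.Str.count, PySem.Str.count]
  have h : ("3" : String).toList = ['3'] := rfl
  have h2 : (w ++ "1").toList = w.toList ++ ['1'] := by simp
  rw [h, h2, chars_count_one, chars_count_one]
  simp

theorem count3_app2 (w : String) : PySem.Str.count (w ++ "2") "3" = PySem.Str.count w "3" := by
  rw [PySem.Str.count, PySem.Str.count]
  have h : ("3" : String).toList = ['3'] := rfl
  have h2 : (w ++ "2").toList = w.toList ++ ['2'] := by simp
  rw [h, h2, chars_count_one, chars_count_one]
  simp

theorem count3_app3 (w : String) : PySem.Str.count (w ++ "3") "3" = PySem.Str.count w "3" + 1 := by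
  rw [PySem.Str.count, PySem.Str.count]
  have h : ("3" : String).toList = ['3'] := rfl
  have h2 : (w ++ "3").toList = w.toList ++ ['3'] := by simp
  rw [h, h2, chars_count_one, chars_count_one]
  simp

-- ===== PORT A =====
def f (st : Int) (fn : Int) (way : String) : Int :=
  if PySem.Str.count way "3" > 1 then 0
  else if st > fn then 0
  else if st = fn then
    if PySem.Str.isIn "3" way then 1 else 0
  else
    f (st + 1) fn (way ++ "1") + f (st + 2) fn (way ++ "2") + f (st * 2) fn (way ++ "3")
termination_by (2 - PySem.Str.count way "3", (fn - st).toNat)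
decreasing_by
  · rw [count3_app1]
    exact Prod.Lex.right _ (by omega)
  · rw [count3_app2]
    exact Prod.Lex.right _ (by omega)
  · rw [count3_app3]
    exact Prod.Lex.left _ _ (by omega)

-- ===== PORT B =====
-- number of ways to climb a gap of d using steps of size 1 and 2 (Source B's `climb`)
def climb (d : Int) : Int :=
  ((PySem.List.pyRange 0 d 1).foldl (fun (p : Int × Int) _ => (p.1 + p.2, p.1)) (1, 0)).1

def f_alt (st : Int) (fn : Int) (way : String) : Int :=
  let c := PySem.Str.count way "3"
  if c > 1 ∨ st > fn then 0
  else if c = 1 then climb (fn - st)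
  else
    let top := min fn (PySem.Int.floordiv fn 2 + 1)
    ((PySem.List.pyRange st top 1).map (fun m => climb (m - st) * climb (fn - 2 * m))).sum

-- ===== PRECONDITION & SPEC =====
-- Pre_f excludes only the inputs on which A's unmemoised recursion overflows CPython's call stack
-- (RecursionError): it admits every input A answers without recursing (st >= fn, or more than one '3'
-- already in way) and otherwise bounds A's recursion depth, which is about (fn - st) + max 0 (-st)
-- (the one surviving doubling of a negative value widens the remaining gap by -st).
def Pre_f (st : Int) (fn : Int) (way : String) : Prop :=
  fn ≤ st ∨ 1 < PySem.Str.count way "3" ∨ (fn - st) + max 0 (-st) ≤ 900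
instance (st : Int) (fn : Int) (way : String) : Decidable (Pre_f st fn way) := by unfold Pre_f; infer_instance
def pvWitness_f : Int × Int × String := (0, 12, "")

def Spec_f (st : Int) (fn : Int) (way : String) (out : Int) : Prop := out = f_alt st fn way
instance (st : Int) (fn : Int) (way : String) (out : Int) : Decidable (Spec_f st fn way out) := by unfold Spec_f; infer_instance

-- ===== CLAIM (what is proved, stated in full; the proofs are below) =====
def Claim_equal_f : Prop := ∀ (st : Int) (fn : Int) (way : String), Dom_f st fn way → Pre_f st fn way → Spec_f st fn way (f st fn way)

-- ===== LEMMAS AND PROOFS =====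

theorem count3_eq (w : String) : PySem.Str.count w "3" = w.toList.count '3' := by
  have h : ("3" : String).toList = ['3'] := rfl
  rw [PySem.Str.count, h, chars_count_one]

theorem isIn3_true (w : String) (h : 0 < PySem.Str.count w "3") : PySem.Str.isIn "3" w = true := by
  rw [PySem.Str.isIn_iff_infix]
  have : '3' ∈ w.toList := by rw [← List.count_pos_iff]; rwa [count3_eq] at h
  obtain ⟨p, q, hpq⟩ := List.mem_iff_append.mp this
  exact ⟨p, q, by rw [hpq]; simp⟩

theorem isIn3_false (w : String) (h : PySem.Str.count w "3" = 0) : PySem.Str.isIn "3" w = false := by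
  rw [← Bool.not_eq_true, PySem.Str.isIn_iff_infix]
  intro hin
  have : '3' ∈ w.toList := hin.mem (by simp : '3' ∈ ("3":String).toList)
  rw [count3_eq] at h
  exact absurd (List.count_pos_iff.mpr this) (by omega)

-- mathematical model of `climb` on nonnegative gaps
def gnat : Nat → Int
  | 0 => 1
  | 1 => 1
  | n + 2 => gnat (n + 1) + gnat n

def G (d : Int) : Int := if d < 0 then 0 else gnat d.toNat

theorem G_neg {d : Int} (h : d < 0) : G d = 0 := by simp [G, h]

theorem G_zero : G 0 = 1 := rfl

theorem G_rec {d : Int} (h : 1 ≤ d) : G d = G (d - 1) + G (d - 2) := by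
  rcases eq_or_lt_of_le h with h1 | h2
  · rw [← h1]; decide
  · have h2' : 2 ≤ d := h2
    obtain ⟨n, rfl⟩ : ∃ n : Nat, d = (n : Int) + 2 :=
      ⟨(d - 2).toNat, by omega⟩
    have e1 : ((n : Int) + 2).toNat = n + 2 := by omega
    have e2 : ((n : Int) + 2 - 1).toNat = n + 1 := by omega
    have e3 : ((n : Int) + 2 - 2).toNat = n := by omega
    simp only [G, if_neg (by omega : ¬ ((n : Int) + 2 < 0)),
      if_neg (by omega : ¬ ((n : Int) + 2 - 1 < 0)),
      if_neg (by omega : ¬ ((n : Int) + 2 - 2 < 0)), e1, e2, e3]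
    rfl

theorem climb_fold (n : Nat) :
    (PySem.List.pyRange 0 (n : Int) 1).foldl (fun (p : Int × Int) _ => (p.1 + p.2, p.1)) (1, 0)
      = (G (n : Int), G ((n : Int) - 1)) := by
  induction n with
  | zero => simp [PySem.List.pyRange_one_eq_nil (le_refl (0 : Int)), G, gnat]
  | succ k ih =>
    have hcast : ((k + 1 : Nat) : Int) = (k : Int) + 1 := by omega
    rw [hcast, PySem.List.pyRange_one_succ_right (by positivity), List.foldl_append, ih]
    simp only [List.foldl_cons, List.foldl_nil]
    have : G ((k : Int) + 1) = G (k : Int) + G ((k : Int) - 1) := by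
      have h2 := G_rec (d := (k : Int) + 1) (by omega)
      rw [show (k : Int) + 1 - 1 = (k : Int) by ring, show (k : Int) + 1 - 2 = (k : Int) - 1 by ring] at h2
      exact h2
    rw [this]
    simp

theorem climb_eq {d : Int} (h : 0 ≤ d) : climb d = G d := by
  obtain ⟨n, rfl⟩ : ∃ n : Nat, d = (n : Int) := ⟨d.toNat, by omega⟩
  rw [climb, climb_fold]

-- mathematical model of B's sum over the doubling position
def S (st fn : Int) : Int :=
  ((PySem.List.pyRange st (min fn (PySem.Int.floordiv fn 2 + 1)) 1).map
    (fun m => G (m - st) * G (fn - 2 * m))).sum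

theorem two_mul_le_iff (st fn : Int) : st ≤ PySem.Int.floordiv fn 2 ↔ st * 2 ≤ fn :=
  PySem.Int.le_floordiv_iff_mul_le (by norm_num)

theorem S_nil {st fn : Int} (h : min fn (PySem.Int.floordiv fn 2 + 1) ≤ st) : S st fn = 0 := by
  rw [S, PySem.List.pyRange_one_eq_nil h]
  simp

theorem S_empty {st fn : Int} (h : fn ≤ st) : S st fn = 0 :=
  S_nil (le_trans (min_le_left _ _) h)

theorem S_step {st fn : Int} (h : st < fn) :
    S st fn = S (st + 1) fn + S (st + 2) fn + (if st * 2 > fn then 0 else G (fn - st * 2)) := by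
  by_cases h2 : st * 2 > fn
  · have hfd : PySem.Int.floordiv fn 2 < st := by
      by_contra hc
      rw [not_lt] at hc
      exact absurd ((two_mul_le_iff st fn).mp hc) (by omega)
    have hT : min fn (PySem.Int.floordiv fn 2 + 1) ≤ st := le_trans (min_le_right _ _) (by omega)
    rw [S_nil hT, S_nil (le_trans hT (by omega)), S_nil (le_trans hT (by omega)), if_pos h2]
    omega
  · rw [not_lt] at h2
    have hfd : st ≤ PySem.Int.floordiv fn 2 := (two_mul_le_iff st fn).mpr h2
    have hst : st < min fn (PySem.Int.floordiv fn 2 + 1) := lt_min h (by omega)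
    rw [if_neg (by omega)]
    rw [S, PySem.List.pyRange_one_cons hst]
    simp only [List.map_cons, List.sum_cons, sub_self, G_zero, one_mul]
    have hcong : ∀ m ∈ PySem.List.pyRange (st + 1) (min fn (PySem.Int.floordiv fn 2 + 1)) 1,
        G (m - st) * G (fn - 2 * m)
          = G (m - (st + 1)) * G (fn - 2 * m) + G (m - (st + 2)) * G (fn - 2 * m) := by
      intro m hm
      obtain ⟨hm1, _⟩ := PySem.List.mem_pyRange_one.mp hm
      rw [G_rec (by omega : 1 ≤ m - st), show m - st - 1 = m - (st + 1) by ring,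
          show m - st - 2 = m - (st + 2) by ring, add_mul]
    rw [List.map_congr_left hcong,
        PySem.List.sum_map_add_int _ (fun m => G (m - (st + 1)) * G (fn - 2 * m))
          (fun m => G (m - (st + 2)) * G (fn - 2 * m))]
    have hS1 : (List.map (fun m => G (m - (st + 1)) * G (fn - 2 * m))
        (PySem.List.pyRange (st + 1) (min fn (PySem.Int.floordiv fn 2 + 1)) 1)).sum = S (st + 1) fn := by
      rw [S]
    have hS2 : (List.map (fun m => G (m - (st + 2)) * G (fn - 2 * m))
        (PySem.List.pyRange (st + 1) (min fn (PySem.Int.floordiv fn 2 + 1)) 1)).sum = S (st + 2) fn := by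
      by_cases hlt : st + 1 < min fn (PySem.Int.floordiv fn 2 + 1)
      · rw [PySem.List.pyRange_one_cons hlt]
        simp only [List.map_cons, List.sum_cons]
        rw [G_neg (by omega : st + 1 - (st + 2) < 0), zero_mul, zero_add,
            show st + 1 + 1 = st + 2 by ring, S]
      · rw [PySem.List.pyRange_one_eq_nil (by omega), S, PySem.List.pyRange_one_eq_nil (by omega)]
    rw [hS1, hS2, show fn - st * 2 = fn - 2 * st by ring]
    ring

theorem f_two {st fn : Int} {way : String} (h : PySem.Str.count way "3" > 1) :
    f st fn way = 0 := by
  rw [f, if_pos h]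

theorem f_one : ∀ (n : Nat) (st fn : Int) (way : String), (fn - st).toNat = n →
    PySem.Str.count way "3" = 1 →
    f st fn way = if st > fn then 0 else G (fn - st) := by
  intro n
  induction n using Nat.strong_induction_on with
  | _ n ih =>
    intro st fn way hn hc
    rw [f, if_neg (by omega)]
    by_cases hgt : st > fn
    · rw [if_pos hgt, if_pos hgt]
    · rw [if_neg hgt, if_neg hgt]
      by_cases heq : st = fn
      · rw [if_pos heq, if_pos (isIn3_true way (by omega)), heq, sub_self, G_zero]
      · have hlt : st < fn := by omega
        rw [if_neg heq]
        rw [f_two (st := st * 2) (by rw [count3_app3]; omega)]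
        rw [ih (fn - (st + 1)).toNat (by omega) (st + 1) fn (way ++ "1") rfl (by rw [count3_app1]; omega)]
        rw [ih (fn - (st + 2)).toNat (by omega) (st + 2) fn (way ++ "2") rfl (by rw [count3_app2]; omega)]
        rw [if_neg (by omega : ¬ st + 1 > fn)]
        have h2 : (if st + 2 > fn then 0 else G (fn - (st + 2))) = G (fn - (st + 2)) := by
          by_cases hb : st + 2 > fn
          · rw [if_pos hb, G_neg (by omega)]
          · rw [if_neg hb]
        rw [h2, G_rec (by omega : 1 ≤ fn - st),
            show fn - st - 1 = fn - (st + 1) by ring, show fn - st - 2 = fn - (st + 2) by ring]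
        ring

theorem f_zero : ∀ (n : Nat) (st fn : Int) (way : String), (fn - st).toNat = n →
    PySem.Str.count way "3" = 0 →
    f st fn way = if st > fn then 0 else S st fn := by
  intro n
  induction n using Nat.strong_induction_on with
  | _ n ih =>
    intro st fn way hn hc
    rw [f, if_neg (by omega)]
    by_cases hgt : st > fn
    · rw [if_pos hgt, if_pos hgt]
    · rw [if_neg hgt, if_neg hgt]
      by_cases heq : st = fn
      · rw [if_pos heq, if_neg (by rw [isIn3_false way hc]; simp), heq, S_empty le_rfl]
      · have hlt : st < fn := by omega
        rw [if_neg heq]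
        rw [ih (fn - (st + 1)).toNat (by omega) (st + 1) fn (way ++ "1") rfl (by rw [count3_app1]; omega)]
        rw [ih (fn - (st + 2)).toNat (by omega) (st + 2) fn (way ++ "2") rfl (by rw [count3_app2]; omega)]
        rw [f_one (fn - st * 2).toNat (st * 2) fn (way ++ "3") rfl (by rw [count3_app3]; omega)]
        rw [if_neg (by omega : ¬ st + 1 > fn)]
        have h2 : (if st + 2 > fn then 0 else S (st + 2) fn) = S (st + 2) fn := by
          by_cases hb : st + 2 > fn
          · rw [if_pos hb, S_empty (by omega)]
          · rw [if_neg hb]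
        rw [h2, S_step hlt]

theorem main_eq (st fn : Int) (way : String) : f st fn way = f_alt st fn way := by
  simp only [f_alt]
  by_cases hc2 : PySem.Str.count way "3" > 1
  · rw [f_two hc2, if_pos (Or.inl hc2)]
  · by_cases hgt : st > fn
    · rw [if_pos (Or.inr hgt)]
      rw [f, if_neg hc2, if_pos hgt]
    · rw [if_neg (by tauto)]
      by_cases hc1 : PySem.Str.count way "3" = 1
      · rw [if_pos hc1, climb_eq (by omega), f_one (fn - st).toNat st fn way rfl hc1, if_neg hgt]
      · have hc0 : PySem.Str.count way "3" = 0 := by omega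
        rw [if_neg hc1, f_zero (fn - st).toNat st fn way rfl hc0, if_neg hgt, S]
        refine congrArg List.sum (List.map_congr_left ?_).symm
        intro m hm
        obtain ⟨hm1, hm2⟩ := PySem.List.mem_pyRange_one.mp hm
        have hmfd : m ≤ PySem.Int.floordiv fn 2 := by
          have := lt_min_iff.mp hm2
          omega
        have h2m : m * 2 ≤ fn := (two_mul_le_iff m fn).mp hmfd
        rw [climb_eq (by omega : (0:Int) ≤ m - st), climb_eq (by omega : (0:Int) ≤ fn - 2 * m)]

-- ===== VERDICT (by name: the statement is the Claim_ definition above) =====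
theorem f_spec : Claim_equal_f := by
  intro st fn way _ _
  unfold Spec_f
  exact main_eq st fn way
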